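-- pv_equiv track=rewrite | github.com/itrummer/schemacompression | src/sc/spider.py | select_databases
-- ===== SOURCE A (Python) =====
-- def select_databases(spider, k):
--     """ Select given number of SPIDER databases.
--
--     Args:
--         spider: data for SPIDER.
--         k: select k databases from SPIDER.
--
--     Returns:
--         names of databases with largest tables.
--     """
--     def table_size(db):
--         """ Calculate average table size for database. """
--         return len(db['column_names'])/len(db['table_names'])
--
--     by_table_size = sorted(
--         spider.items(), key=lambda i:table_size(i[1]),
--         reverse=True)
--     sorted_db_names = [i[0] for i in by_table_size]
--     return sorted_db_names[:k]
-- ===== SOURCE B (Python) =====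
-- def select_databases(spider, k):
--     """ Select given number of SPIDER databases.
--
--     Top-k selection in one pass over a bounded, descending buffer
--     instead of sorting everything and slicing.
--     """
--     def table_size(db):
--         """ Calculate average table size for database. """
--         return len(db['column_names'])/len(db['table_names'])
--
--     top = []  # (name, size) pairs, size descending, ties by arrival, at most k entries
--     for name, db in spider.items():
--         size = table_size(db)
--         i = 0
--         while i < len(top) and top[i][1] >= size:
--             i += 1
--         top.insert(i, (name, size))
--         if len(top) > k:
--             top.pop()
--     return [name for name, _ in top]
-- ===== Notes on version B (the rewrite author's own statement) =====
-- stated objective: alternative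
-- what changed: Replaces sort-everything-then-slice by a single pass maintaining a bounded (at most k entries) descending buffer of (name, avg-table-size) pairs, inserting each database at its position and popping the tail; Pre_ excludes inputs where A raises (missing 'column_names'/'table_names' or empty 'table_names') and negative k with |k| < number of databases, where A's Python slice semantics keep all but the last |k| names while B selects nothing.
import Mathlib
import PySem

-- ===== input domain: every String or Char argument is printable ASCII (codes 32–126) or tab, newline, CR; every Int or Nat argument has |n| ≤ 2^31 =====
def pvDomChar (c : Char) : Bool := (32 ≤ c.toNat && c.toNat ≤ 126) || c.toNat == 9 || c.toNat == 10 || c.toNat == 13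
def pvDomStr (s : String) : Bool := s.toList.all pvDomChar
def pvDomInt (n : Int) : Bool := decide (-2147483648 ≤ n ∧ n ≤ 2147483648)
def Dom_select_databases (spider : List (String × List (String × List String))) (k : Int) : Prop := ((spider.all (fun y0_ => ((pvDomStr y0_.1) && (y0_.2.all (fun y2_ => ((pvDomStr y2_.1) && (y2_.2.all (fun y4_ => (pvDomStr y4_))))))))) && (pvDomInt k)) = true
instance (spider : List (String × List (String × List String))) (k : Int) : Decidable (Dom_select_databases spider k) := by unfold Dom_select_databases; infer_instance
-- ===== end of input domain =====

-- B replaces A's full sort-then-slice by a one-pass bounded top-k buffer (alternative algorithm, same result).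
-- Both ports model Python's float key len(cols)/len(tabs) as the exact rational ℚ; this is exact wherever the
-- double-precision comparisons Python performs agree with the rational ones (all realistic list lengths).

-- ===== PORT A =====
-- inner helper table_size(db): len(db['column_names'])/len(db['table_names']); dict lookups via PySem.Dict
def pvTableSize (db : List (String × List String)) : ℚ :=
  (((PySem.Dict.ofList db).getD "column_names" []).length : ℚ) /
    (((PySem.Dict.ofList db).getD "table_names" []).length : ℚ)

def select_databases (spider : List (String × List (String × List String))) (k : Int) : List String :=
  let by_table_size := PySem.List.sorted (PySem.Dict.ofList spider).items (fun i => pvTableSize i.2) true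
  let sorted_db_names := by_table_size.map (fun i => i.1)
  PySem.List.slice sorted_db_names none (some k)

-- ===== PORT B =====
-- the while-loop + insert of Source B: walk past entries with size ≥ new size, insert there
def pvInsTop (x : String × ℚ) : List (String × ℚ) → List (String × ℚ)
  | [] => [x]
  | y :: ys => if y.2 ≥ x.2 then y :: pvInsTop x ys else x :: y :: ys

def select_databases_alt (spider : List (String × List (String × List String))) (k : Int) : List String :=
  let top := (PySem.Dict.ofList spider).items.foldl
    (fun top it =>
      let t := pvInsTop (it.1, pvTableSize it.2) top
      if k < (t.length : Int) then t.dropLast else t) []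
  top.map (fun p => p.1)

-- ===== PRECONDITION & SPEC =====
-- Pre_ excludes (a) inputs on which A raises: a database missing 'column_names' (KeyError) or with a missing or
-- empty 'table_names' (KeyError/ZeroDivisionError); and (b) negative k with |k| smaller than the number of
-- databases — a count outside the task's natural domain, where A's Python slice semantics keep all but the last
-- |k| names while B selects nothing (for k ≤ -(number of databases) both return [] and stay inside Pre_).
def Pre_select_databases (spider : List (String × List (String × List String))) (k : Int) : Prop :=
  (0 ≤ k ∨ ((PySem.Dict.ofList spider).items.length : Int) + k ≤ 0) ∧
  ∀ p ∈ (PySem.Dict.ofList spider).items,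
    (PySem.Dict.ofList p.2).contains "column_names" = true ∧
    (PySem.Dict.ofList p.2).getD "table_names" [] ≠ []
instance (spider : List (String × List (String × List String))) (k : Int) : Decidable (Pre_select_databases spider k) := by unfold Pre_select_databases; infer_instance

def pvWitness_select_databases : (List (String × List (String × List String))) × Int :=
  ([("a", [("column_names", ["c"]), ("table_names", ["t"])]),
    ("b", [("column_names", ["c", "d"]), ("table_names", ["t"])])], 1)

def Spec_select_databases (spider : List (String × List (String × List String))) (k : Int) (out : List String) : Prop := out = select_databases_alt spider k
instance (spider : List (String × List (String × List String))) (k : Int) (out : List String) : Decidable (Spec_select_databases spider k out) := by unfold Spec_select_databases; infer_instance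

-- ===== CLAIM (what is proved, stated in full; the proofs are below) =====
def Claim_equal_select_databases : Prop := ∀ (spider : List (String × List (String × List String))) (k : Int), Dom_select_databases spider k → Pre_select_databases spider k → Spec_select_databases spider k (select_databases spider k)

-- ===== LEMMAS AND PROOFS =====

-- B's insertion step IS insertBy with the reverse-sort predicate
theorem pvInsTop_eq_insertBy (x : String × ℚ) (ys : List (String × ℚ)) :
    pvInsTop x ys = PySem.List.insertBy (fun a b => decide (b.2 < a.2)) x ys := by
  induction ys with
  | nil => rfl
  | cons y t ih =>
      simp only [pvInsTop, PySem.List.insertBy]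
      by_cases h : y.2 ≥ x.2
      · simp [h, not_lt.mpr h, ih]
      · simp [h, lt_of_not_ge h]

theorem pvInsTop_length (x : String × ℚ) (ys : List (String × ℚ)) :
    (pvInsTop x ys).length = ys.length + 1 := by
  induction ys with
  | nil => rfl
  | cons y t ih => simp only [pvInsTop]; split <;> simp [ih]

-- truncating before or after an insertion gives the same first K elements
theorem take_insertBy_take {α : Type} (bef : α → α → Bool) (x : α) :
    ∀ (ys : List α) (K : ℕ),
      (PySem.List.insertBy bef x (ys.take K)).take K = (PySem.List.insertBy bef x ys).take K := by
  intro ys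
  induction ys with
  | nil => intro K; simp
  | cons y t ih =>
      intro K
      cases K with
      | zero => rfl
      | succ m =>
          simp only [List.take_succ_cons, PySem.List.insertBy]
          by_cases h : bef x y
          · cases m with
            | zero => simp [h]
            | succ m' => simp [h, List.take_take]
          · simp [h, ih m]

-- folding the truncated insertion equals truncating the full insertion-sort fold
theorem foldl_take_insertBy {α : Type} (bef : α → α → Bool) (K : ℕ) :
    ∀ (xs : List α) (acc : List α),
      xs.foldl (fun a x => (PySem.List.insertBy bef x a).take K) (acc.take K)
        = (xs.foldl (fun a x => PySem.List.insertBy bef x a) acc).take K := by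
  intro xs
  induction xs with
  | nil => intro acc; rfl
  | cons x t ih =>
      intro acc
      simp only [List.foldl_cons]
      rw [take_insertBy_take bef x acc K]
      exact ih (PySem.List.insertBy bef x acc)

-- the decoration (name, db) ↦ (name, table_size db) commutes with insertion
theorem insertBy_map_decorate (x : String × List (String × List String))
    (ys : List (String × List (String × List String))) :
    PySem.List.insertBy (fun a b => decide (b.2 < a.2)) (x.1, pvTableSize x.2)
        (ys.map (fun it => (it.1, pvTableSize it.2)))
      = (PySem.List.insertBy (fun a b => decide (pvTableSize b.2 < pvTableSize a.2)) x ys).map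
          (fun it => (it.1, pvTableSize it.2)) := by
  induction ys with
  | nil => rfl
  | cons y t ih =>
      simp only [List.map_cons, PySem.List.insertBy]
      by_cases h : pvTableSize y.2 < pvTableSize x.2
      · simp [h]
      · simp [h, ih]

-- B's whole fold, decorated, is the truncated reverse-insertion-sort fold
theorem foldl_decorate (K : ℕ) :
    ∀ (xs : List (String × List (String × List String)))
      (acc : List (String × List (String × List String))),
      xs.foldl (fun a it => (pvInsTop (it.1, pvTableSize it.2) a).take K)
          ((acc.map (fun it => (it.1, pvTableSize it.2))))
        = (xs.foldl
            (fun a it => (PySem.List.insertBy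
              (fun p q => decide (pvTableSize q.2 < pvTableSize p.2)) it a).take K) acc).map
            (fun it => (it.1, pvTableSize it.2)) := by
  intro xs
  induction xs with
  | nil => intro acc; rfl
  | cons x t ih =>
      intro acc
      simp only [List.foldl_cons]
      rw [pvInsTop_eq_insertBy, insertBy_map_decorate, ← List.map_take, ih]

-- B's literal step (insert, then pop the tail if over k) is insertion truncated to k
theorem stepB_eq_take (k : Int) (K : ℕ) (hk : k.toNat = K)
    (x : String × ℚ) (a : List (String × ℚ)) (ha : a.length ≤ K) :
    (if k < ((pvInsTop x a).length : Int) then (pvInsTop x a).dropLast else pvInsTop x a)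
      = (pvInsTop x a).take K := by
  have hlen : (pvInsTop x a).length = a.length + 1 := pvInsTop_length x a
  by_cases h : k < ((pvInsTop x a).length : Int)
  · have hK : a.length = K := by omega
    simp only [h, if_pos]
    rw [List.dropLast_eq_take]
    congr 1
    omega
  · have : K ≥ (pvInsTop x a).length := by omega
    simp [h, List.take_of_length_le this]

-- B's fold with the literal step equals the fold with the take-k step
theorem foldl_stepB (k : Int) (K : ℕ) (hk : k.toNat = K) :
    ∀ (xs : List (String × List (String × List String))) (a : List (String × ℚ)),
      a.length ≤ K →
      xs.foldl (fun top it =>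
          let t := pvInsTop (it.1, pvTableSize it.2) top
          if k < (t.length : Int) then t.dropLast else t) a
        = xs.foldl (fun top it => (pvInsTop (it.1, pvTableSize it.2) top).take K) a := by
  intro xs
  induction xs with
  | nil => intro a _; rfl
  | cons x t ih =>
      intro a ha
      simp only [List.foldl_cons]
      rw [stepB_eq_take k K hk _ a ha, ih]
      exact le_trans (List.length_take_le _ _) (le_refl K)

theorem select_databases_eq (spider : List (String × List (String × List String))) (k : Int)
    (h0 : 0 ≤ k ∨ ((PySem.Dict.ofList spider).items.length : Int) + k ≤ 0) :
    select_databases spider k = select_databases_alt spider k := by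
  unfold select_databases select_databases_alt
  set items := (PySem.Dict.ofList spider).items with hitems
  have hslice : PySem.List.slice
      ((PySem.List.sorted items (fun i => pvTableSize i.2) true).map (fun i => i.1)) none (some k)
      = ((PySem.List.sorted items (fun i => pvTableSize i.2) true).map (fun i => i.1)).take k.toNat := by
    rcases h0 with h0 | h0
    · exact PySem.List.slice_to _ h0
    · by_cases hk : 0 ≤ k
      · exact PySem.List.slice_to _ hk
      · have hlen : ((PySem.List.sorted items (fun i => pvTableSize i.2) true).map
            (fun i => i.1)).length = items.length := by
          simp [PySem.List.length_sorted]
        simp only [PySem.List.slice, PySem.List.clampIdx, hlen]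
        split_ifs <;> simp <;> omega
  rw [hslice]
  rw [foldl_stepB k k.toNat rfl items [] (by simp)]
  have hfold := foldl_decorate k.toNat items []
  simp only [List.map_nil] at hfold
  rw [hfold]
  have htr := foldl_take_insertBy
    (fun p q => decide (pvTableSize q.2 < pvTableSize p.2)) k.toNat items ([] : List (String × List (String × List String)))
  simp only [List.take_nil] at htr
  rw [htr]
  rw [PySem.List.sorted_rev_eq_foldl_insertBy items (fun i => pvTableSize i.2)]
  simp only [List.map_take, List.map_map]
  rfl

-- ===== VERDICT (by name: the statement is the Claim_ definition above) =====
theorem select_databases_spec : Claim_equal_select_databases := by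
  intro spider k _hdom hpre
  unfold Spec_select_databases
  exact select_databases_eq spider k hpre.1
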